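-- pv_equiv track=rewrite | github.com/thiagobrs/jet-brains-academy | easy_rider.py | get_special_stops
-- ===== SOURCE A (Python) =====
-- def get_special_stops(data):
--     # dictionary to identify transfer stops
--     transfer_stop_dict = dict()
--
--     # sets of starting point, final stops and transfer stops
--     starting_point_set, final_stop_set, transfer_stop_set, ondemand_stop_set = set(), set(), set(), set()
--
--     # iterate over each json sub-element
--     for bus_line in data:
--         # update the transfer stop dictionary with this bus line information
--         transfer_stop_dict[bus_line["stop_name"]] = transfer_stop_dict.get(bus_line["stop_name"], 0) + 1
--
--         # if this stop_name has more than 1 occurrence, it means that it is shared by 2 or more bus lines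
--         # so, we add it to the transfer_set
--         if transfer_stop_dict.get(bus_line["stop_name"], 0) > 1:
--             transfer_stop_set.add(bus_line["stop_name"])
--
--         # check if it is a special stop and update the appropriate set
--         if bus_line["stop_type"] == "S":
--             # add this starting point to the starting_point_set
--             starting_point_set.add(bus_line["stop_name"])
--         elif bus_line["stop_type"] == "F":
--             # add this final stop to the final_stop_set
--             final_stop_set.add(bus_line["stop_name"])
--         elif bus_line["stop_type"] == "O":
--             # add this on-demand stop to the on_demand_set
--             ondemand_stop_set.add(bus_line["stop_name"])
--
--     return starting_point_set, final_stop_set, transfer_stop_set, ondemand_stop_set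
-- ===== SOURCE B (Python) =====
-- def get_special_stops(data):
--     # Derive each set independently: comprehensions filtering by stop_type,
--     # and transfer stops as names already seen earlier in the name list.
--     names = [line["stop_name"] for line in data]
--     starting_point_set = {line["stop_name"] for line in data if line["stop_type"] == "S"}
--     final_stop_set = {line["stop_name"] for line in data if line["stop_type"] == "F"}
--     ondemand_stop_set = {line["stop_name"] for line in data if line["stop_type"] == "O"}
--     transfer_stop_set = {n for i, n in enumerate(names) if n in names[:i]}
--     return starting_point_set, final_stop_set, transfer_stop_set, ondemand_stop_set
-- ===== Notes on version B (the rewrite author's own statement) =====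
-- stated objective: simpler
-- what changed: Replaces A's single interleaved loop that threads a count dict and four sets through every iteration with independent derivations: three comprehensions filtering by stop_type, and a transfer-stop comprehension selecting names that already occur earlier in the name list.
import Mathlib
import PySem

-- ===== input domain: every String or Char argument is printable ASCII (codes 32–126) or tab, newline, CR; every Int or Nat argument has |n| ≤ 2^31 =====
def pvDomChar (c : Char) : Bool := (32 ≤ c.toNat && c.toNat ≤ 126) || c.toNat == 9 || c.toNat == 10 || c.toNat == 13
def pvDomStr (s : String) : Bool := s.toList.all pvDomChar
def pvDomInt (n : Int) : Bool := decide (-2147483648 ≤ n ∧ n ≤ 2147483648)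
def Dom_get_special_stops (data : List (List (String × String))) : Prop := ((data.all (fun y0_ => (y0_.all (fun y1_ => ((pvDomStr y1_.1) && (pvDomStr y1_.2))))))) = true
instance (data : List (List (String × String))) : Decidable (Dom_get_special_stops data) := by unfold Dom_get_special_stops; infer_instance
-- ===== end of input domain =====

-- B replaces A's single interleaved loop (count dict + four sets threaded together) with
-- independent derivations: three stop_type-filter comprehensions and a duplicate-in-prefix
-- comprehension over the name list (objective: simpler).

-- ===== PORT A =====
-- bus_line["stop_name"] / bus_line["stop_type"]: first-match dict lookup; total form with
-- default "" — exact on Pre_ (both keys present; Python raises KeyError otherwise).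
def pvName (line : List (String × String)) : String := (PySem.Dict.mk line).getD "stop_name" ""
def pvType (line : List (String × String)) : String := (PySem.Dict.mk line).getD "stop_type" ""

-- the body of A's for-loop: state = (transfer_stop_dict, starting, final, transfer, ondemand)
def getSpecialStopsStep
    (acc : PySem.Dict String Int × PySem.Set String × PySem.Set String × PySem.Set String × PySem.Set String)
    (bus_line : List (String × String)) :
    PySem.Dict String Int × PySem.Set String × PySem.Set String × PySem.Set String × PySem.Set String :=
  match acc with
  | (d, s, f, t, o) =>
    let name := pvName bus_line
    let d := d.insert name (d.getD name 0 + 1)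
    let t := if d.getD name 0 > 1 then PySem.Set.add t name else t
    if pvType bus_line == "S" then (d, PySem.Set.add s name, f, t, o)
    else if pvType bus_line == "F" then (d, s, PySem.Set.add f name, t, o)
    else if pvType bus_line == "O" then (d, s, f, t, PySem.Set.add o name)
    else (d, s, f, t, o)

def get_special_stops (data : List (List (String × String))) : List String × List String × List String × List String :=
  let r := data.foldl getSpecialStopsStep
    ((PySem.Dict.empty : PySem.Dict String Int), (PySem.Set.empty : PySem.Set String),
     (PySem.Set.empty : PySem.Set String), (PySem.Set.empty : PySem.Set String), (PySem.Set.empty : PySem.Set String))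
  (r.2.1, r.2.2.1, r.2.2.2.1, r.2.2.2.2)

-- ===== PORT B =====
-- {line["stop_name"] for line in data if line["stop_type"] == ty}
def pvSel (ty : String) (data : List (List (String × String))) : List String :=
  data.filterMap (fun line => if pvType line == ty then some (pvName line) else none)

-- {n for i, n in enumerate(names) if n in names[:i]}; i ≥ 0 so names[:i] = take i.toNat (exact)
def pvDups (ns : List String) : List String :=
  (PySem.List.enumerate ns 0).filterMap (fun p => if (ns.take p.1.toNat).contains p.2 then some p.2 else none)

def get_special_stops_alt (data : List (List (String × String))) : List String × List String × List String × List String :=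
  let names := data.map pvName
  let starting_point_set := PySem.Set.ofList (pvSel "S" data)
  let final_stop_set := PySem.Set.ofList (pvSel "F" data)
  let ondemand_stop_set := PySem.Set.ofList (pvSel "O" data)
  let transfer_stop_set := PySem.Set.ofList (pvDups names)
  (starting_point_set, final_stop_set, transfer_stop_set, ondemand_stop_set)

-- ===== PRECONDITION & SPEC =====
-- Pre_ excludes exactly the inputs where Python A raises KeyError: some bus_line lacking
-- the key "stop_name" or "stop_type".
def Pre_get_special_stops (data : List (List (String × String))) : Prop :=
  (data.all (fun line => line.any (fun p => p.1 == "stop_name") && line.any (fun p => p.1 == "stop_type"))) = true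
instance (data : List (List (String × String))) : Decidable (Pre_get_special_stops data) := by
  unfold Pre_get_special_stops; infer_instance

def pvWitness_get_special_stops : (List (List (String × String))) :=
  [[("stop_name", "Pilotow"), ("stop_type", "S")],
   [("stop_name", "Pilotow"), ("stop_type", "F")]]

def Spec_get_special_stops (data : List (List (String × String))) (out : List String × List String × List String × List String) : Prop := out = get_special_stops_alt data
instance (data : List (List (String × String))) (out : List String × List String × List String × List String) : Decidable (Spec_get_special_stops data out) := by unfold Spec_get_special_stops; infer_instance

-- ===== CLAIM (what is proved, stated in full; the proofs are below) =====
def Claim_equal_get_special_stops : Prop := ∀ (data : List (List (String × String))), Dom_get_special_stops data → Pre_get_special_stops data → Spec_get_special_stops data (get_special_stops data)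

-- ===== LEMMAS AND PROOFS =====

-- the dict component of A's fold: a running count
def pvCnt (ns : List String) : PySem.Dict String Int :=
  ns.foldl (fun d m => d.insert m (d.getD m 0 + 1)) PySem.Dict.empty

theorem getD_foldl_insert_count (ns : List String) (d : PySem.Dict String Int) (n : String) :
    (ns.foldl (fun d m => d.insert m (d.getD m 0 + 1)) d).getD n 0 = d.getD n 0 + ns.count n := by
  induction ns generalizing d with
  | nil => simp
  | cons m ns ih =>
    simp only [List.foldl_cons, ih]
    by_cases h : n = m
    · subst h
      rw [PySem.Dict.getD_insert_self]
      simp; omega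
    · rw [PySem.Dict.getD_insert_of_ne _ _ _ h]
      have h' : ¬ m = n := fun e => h e.symm
      simp [h']

theorem getD_pvCnt (ns : List String) (n : String) : (pvCnt ns).getD n 0 = ns.count n := by
  simpa using getD_foldl_insert_count ns PySem.Dict.empty n

theorem ofList_concat {α : Type} [BEq α] (L : List α) (x : α) :
    PySem.Set.ofList (L ++ [x]) = PySem.Set.add (PySem.Set.ofList L) x := by
  simp [PySem.Set.ofList_eq_foldl]

theorem pvSel_concat (ty : String) (data : List (List (String × String))) (b : List (String × String)) :
    pvSel ty (data ++ [b]) = pvSel ty data ++ (if pvType b == ty then [pvName b] else []) := by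
  simp only [pvSel, List.filterMap_append, List.filterMap_cons, List.filterMap_nil]
  by_cases h : pvType b == ty <;> simp [h]

theorem pvDups_concat (ns : List String) (n : String) :
    pvDups (ns ++ [n]) = pvDups ns ++ (if n ∈ ns then [n] else []) := by
  unfold pvDups
  rw [PySem.List.enumerate_append, List.filterMap_append]
  congr 1
  · apply List.filterMap_congr
    intro p hp
    rcases (PySem.List.mem_enumerate_iff ns 0 p).mp hp with ⟨k, hk, rfl⟩
    simp only [zero_add]
    rw [show ((k : Int)).toNat = k by simp,
        List.take_append_of_le_length (Nat.le_of_lt hk)]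
  · simp only [PySem.List.enumerate, List.filterMap_cons, List.filterMap_nil]
    rw [show ((0 : Int) + ns.length).toNat = ns.length by simp, List.take_left]
    by_cases h : n ∈ ns <;> simp [h]

theorem mainA (data : List (List (String × String))) :
    data.foldl getSpecialStopsStep
      ((PySem.Dict.empty : PySem.Dict String Int), (PySem.Set.empty : PySem.Set String),
       (PySem.Set.empty : PySem.Set String), (PySem.Set.empty : PySem.Set String), (PySem.Set.empty : PySem.Set String))
    = (pvCnt (data.map pvName),
       PySem.Set.ofList (pvSel "S" data),
       PySem.Set.ofList (pvSel "F" data),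
       PySem.Set.ofList (pvDups (data.map pvName)),
       PySem.Set.ofList (pvSel "O" data)) := by
  induction data using List.reverseRecOn with
  | nil => rfl
  | append_singleton data b ih =>
    rw [List.foldl_append, ih]
    simp only [List.foldl_cons, List.foldl_nil, List.map_append, List.map_cons, List.map_nil]
    have hcnt : pvCnt (data.map pvName ++ [pvName b])
        = (pvCnt (data.map pvName)).insert (pvName b) ((pvCnt (data.map pvName)).getD (pvName b) 0 + 1) := by
      simp [pvCnt, List.foldl_append]
    have hcond : (((pvCnt (data.map pvName)).insert (pvName b)
          ((pvCnt (data.map pvName)).getD (pvName b) 0 + 1)).getD (pvName b) 0 > 1)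
        ↔ pvName b ∈ data.map pvName := by
      rw [PySem.Dict.getD_insert_self, getD_pvCnt]
      constructor
      · intro h
        have : 0 < (data.map pvName).count (pvName b) := by exact_mod_cast (by omega : (0:Int) < (data.map pvName).count (pvName b))
        exact List.count_pos_iff.mp this
      · intro h
        have : 0 < (data.map pvName).count (pvName b) := List.count_pos_iff.mpr h
        have : (0:Int) < (data.map pvName).count (pvName b) := by exact_mod_cast this
        omega
    have ht : (if ((pvCnt (data.map pvName ++ [pvName b])).getD (pvName b) 0 > 1)
          then PySem.Set.add (PySem.Set.ofList (pvDups (data.map pvName))) (pvName b)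
          else PySem.Set.ofList (pvDups (data.map pvName)))
        = PySem.Set.ofList (pvDups (data.map pvName ++ [pvName b])) := by
      rw [pvDups_concat]
      by_cases h : pvName b ∈ data.map pvName
      · rw [if_pos (by rw [hcnt]; exact hcond.mpr h), if_pos h, ofList_concat]
      · rw [if_neg (fun hc => h (hcond.mp (by rw [hcnt] at hc; exact hc))), if_neg h, List.append_nil]
    unfold getSpecialStopsStep
    simp only
    rw [← hcnt, ht, pvSel_concat "S", pvSel_concat "F", pvSel_concat "O"]
    by_cases hS : pvType b == "S"
    · simp [ofList_concat, show pvType b = "S" from by simpa using hS]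
    · by_cases hF : pvType b == "F"
      · simp [ofList_concat, show pvType b = "F" from by simpa using hF]
      · by_cases hO : pvType b == "O"
        · simp [ofList_concat, show pvType b = "O" from by simpa using hO]
        · simp [hS, hF, hO]

-- ===== VERDICT (by name: the statement is the Claim_ definition above) =====
theorem get_special_stops_spec : Claim_equal_get_special_stops := by
  intro data _ _
  unfold Spec_get_special_stops get_special_stops get_special_stops_alt
  rw [mainA]
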